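-- pv_equiv track=rewrite | github.com/FlorianBord2/IAintro | bord_src/my_utils.py | find_near_room
-- ===== SOURCE A (Python) =====
-- passages = [{1, 4}, {0, 2}, {1, 3}, {2, 7}, {0, 5, 8},
--             {4, 6}, {5, 7}, {3, 6, 9}, {4, 9}, {7, 8}]
--
-- def find_near_room(color):
--     position = color['position']
--     posibility = []
--     for doors in passages:
--         if position in doors:
--             for room in doors:
--                 if room != position and room not in posibility:
--                     posibility.append(room)
--     return posibility
-- ===== SOURCE B (Python) =====
-- passages = [{1, 4}, {0, 2}, {1, 3}, {2, 7}, {0, 5, 8},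
--             {4, 6}, {5, 7}, {3, 6, 9}, {4, 9}, {7, 8}]
--
-- # Precomputed once at module load: room -> ordered list of adjacent rooms.
-- adjacency = {}
-- for _doors in passages:
--     for _room in _doors:
--         for _other in _doors:
--             if _other != _room:
--                 adjacency.setdefault(_room, []).append(_other)
--
-- def find_near_room(color):
--     return list(adjacency.get(color['position'], []))
-- ===== Notes on version B (the rewrite author's own statement) =====
-- stated objective: faster
-- what changed: Builds a module-level adjacency dictionary from the passages once, so each call is a single dict lookup (plus a fresh list copy) instead of scanning all ten door sets.
import Mathlib
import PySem

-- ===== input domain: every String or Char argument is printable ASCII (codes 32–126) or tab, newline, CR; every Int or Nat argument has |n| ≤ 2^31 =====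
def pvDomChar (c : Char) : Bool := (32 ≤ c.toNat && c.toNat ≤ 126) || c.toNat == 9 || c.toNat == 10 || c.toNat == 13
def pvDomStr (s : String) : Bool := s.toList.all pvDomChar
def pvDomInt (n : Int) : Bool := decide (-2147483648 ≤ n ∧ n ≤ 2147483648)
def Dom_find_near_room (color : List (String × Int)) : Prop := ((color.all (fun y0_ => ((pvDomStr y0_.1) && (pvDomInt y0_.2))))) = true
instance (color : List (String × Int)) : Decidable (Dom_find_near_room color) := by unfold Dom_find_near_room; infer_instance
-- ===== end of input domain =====

-- B builds a module-level adjacency dict once so each call is one dict lookup instead of a scan of all passages (return value only).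

-- ===== PORT A =====
-- passages: list of Python sets; elements listed in CPython's set-iteration order for these literals.
def pvPassages : List (PySem.Set Int) :=
  [PySem.Set.ofList [1, 4], PySem.Set.ofList [0, 2], PySem.Set.ofList [1, 3],
   PySem.Set.ofList [2, 7], PySem.Set.ofList [0, 8, 5], PySem.Set.ofList [4, 6],
   PySem.Set.ofList [5, 7], PySem.Set.ofList [9, 3, 6], PySem.Set.ofList [9, 4],
   PySem.Set.ofList [8, 7]]

def find_near_room (color : List (String × Int)) : List Int :=
  match (PySem.Dict.mk color).get? "position" with
  | none => []   -- KeyError in Python; excluded by Pre_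
  | some position =>
    pvPassages.foldl (fun posibility doors =>
      if position ∈ doors then
        doors.foldl (fun posibility room =>
          if room ≠ position ∧ room ∉ posibility then posibility ++ [room] else posibility)
          posibility
      else posibility) []

-- ===== PORT B =====
-- module-level precomputation: for each door, each room gets the other rooms of the door appended.
def pvAdjacency : PySem.Dict Int (List Int) :=
  pvPassages.foldl (fun adjacency doors =>
    doors.foldl (fun adjacency room =>
      doors.foldl (fun adjacency other =>
        if other ≠ room then adjacency.modify room [] (· ++ [other]) else adjacency)
        adjacency) adjacency) PySem.Dict.empty

def find_near_room_alt (color : List (String × Int)) : List Int :=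
  match (PySem.Dict.mk color).get? "position" with
  | none => []   -- KeyError in Python; excluded by Pre_
  | some position => pvAdjacency.getD position []

-- ===== PRECONDITION & SPEC =====
-- Pre_: the dict has a "position" key; otherwise Python A raises KeyError.
def Pre_find_near_room (color : List (String × Int)) : Prop :=
  ((PySem.Dict.mk color).get? "position").isSome = true
instance (color : List (String × Int)) : Decidable (Pre_find_near_room color) := by
  unfold Pre_find_near_room; infer_instance
def pvWitness_find_near_room : (List (String × Int)) := [("position", 4)]

def Spec_find_near_room (color : List (String × Int)) (out : List Int) : Prop := out = find_near_room_alt color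
instance (color : List (String × Int)) (out : List Int) : Decidable (Spec_find_near_room color out) := by unfold Spec_find_near_room; infer_instance

-- ===== CLAIM (what is proved, stated in full; the proofs are below) =====
def Claim_equal_find_near_room : Prop := ∀ (color : List (String × Int)), Dom_find_near_room color → Pre_find_near_room color → Spec_find_near_room color (find_near_room color)

-- ===== LEMMAS AND PROOFS =====

-- the scan of A and the lookup of B agree for every position
set_option maxRecDepth 8192 in
lemma core_eq (p : Int) :
    pvPassages.foldl (fun posibility doors =>
      if p ∈ doors then
        doors.foldl (fun posibility room =>
          if room ≠ p ∧ room ∉ posibility then posibility ++ [room] else posibility)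
          posibility
      else posibility) [] = pvAdjacency.getD p [] := by
  by_cases h0 : p = 0; · subst h0; decide
  by_cases h1 : p = 1; · subst h1; decide
  by_cases h2 : p = 2; · subst h2; decide
  by_cases h3 : p = 3; · subst h3; decide
  by_cases h4 : p = 4; · subst h4; decide
  by_cases h5 : p = 5; · subst h5; decide
  by_cases h6 : p = 6; · subst h6; decide
  by_cases h7 : p = 7; · subst h7; decide
  by_cases h8 : p = 8; · subst h8; decide
  by_cases h9 : p = 9; · subst h9; decide
  have hadj : pvAdjacency = PySem.Dict.mk
      [(1, [4, 3]), (4, [1, 6, 9]), (0, [2, 8, 5]), (2, [0, 7]), (3, [1, 9, 6]),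
       (7, [2, 5, 8]), (8, [0, 5, 7]), (5, [0, 8, 7]), (6, [4, 9, 3]), (9, [3, 6, 4])] := by
    decide
  rw [hadj]
  simp [pvPassages, PySem.Set.ofList, PySem.Set.add,
        PySem.Dict.getD_eq_get?_getD, PySem.Dict.get?,
        h0, h1, h2, h3, h4, h5, h6, h7, h8, h9]
  have e0 : ((0 : Int) == p) = false := by simpa using Ne.symm h0
  have e1 : ((1 : Int) == p) = false := by simpa using Ne.symm h1
  have e2 : ((2 : Int) == p) = false := by simpa using Ne.symm h2
  have e3 : ((3 : Int) == p) = false := by simpa using Ne.symm h3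
  have e4 : ((4 : Int) == p) = false := by simpa using Ne.symm h4
  have e5 : ((5 : Int) == p) = false := by simpa using Ne.symm h5
  have e6 : ((6 : Int) == p) = false := by simpa using Ne.symm h6
  have e7 : ((7 : Int) == p) = false := by simpa using Ne.symm h7
  have e8 : ((8 : Int) == p) = false := by simpa using Ne.symm h8
  have e9 : ((9 : Int) == p) = false := by simpa using Ne.symm h9
  simp [List.find?, e0, e1, e2, e3, e4, e5, e6, e7, e8, e9]

-- ===== VERDICT (by name: the statement is the Claim_ definition above) =====
theorem find_near_room_spec : Claim_equal_find_near_room := by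
  intro color _ hpre
  unfold Spec_find_near_room find_near_room find_near_room_alt
  cases hg : (PySem.Dict.mk color).get? "position" with
  | none => simp [Pre_find_near_room, hg] at hpre
  | some p => exact core_eq p
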